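-- pv_equiv track=rewrite | github.com/google/google-ctf | 2025/quals/misc-fishmaze/challenge/game.py | get_dynamic_ray_segments
-- ===== SOURCE A (Python) =====
-- DELTA_DIRECTIONS = {
--     "down": (1, 0),
--     "up": (-1, 0),
--     "left": (0, -1),
--     "right": (0, 1)
-- }
--
-- def get_dynamic_ray_segments(head_pos, direction_str, num_segments, maze_width, maze_height):
--     """
--     Calculates the positions of all ray segments based on the head's position and direction.
--     Segments trail behind the head. Only returns segments that are within maze bounds.
--     The list is ordered [head, segment_behind_head, segment_further_behind_head].
--     """
--     segments = []
--     if head_pos is None: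
--         return segments
--
--     move_delta_r, move_delta_c = DELTA_DIRECTIONS.get(direction_str, (0, 0))
--
--     for i in range(num_segments):  # i = 0 for head, 1 for first tail, 2 for second tail
--         seg_r = head_pos[0] - i * move_delta_r
--         seg_c = head_pos[1] - i * move_delta_c
--
--         if 0 <= seg_r < maze_height and 0 <= seg_c < maze_width:
--             segments.append((seg_r, seg_c))
--         # else:
--             # If a segment is out of bounds, subsequent ones (further back) might also be.
--             # This logic correctly adds only in-bounds segments.
--     return segments
-- ===== SOURCE B (Python) =====
-- DELTA_DIRECTIONS = {
--     "down": (1, 0),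
--     "up": (-1, 0),
--     "left": (0, -1),
--     "right": (0, 1)
-- }
--
-- def get_dynamic_ray_segments(head_pos, direction_str, num_segments, maze_width, maze_height):
--     # Closed-form: solve the bound inequalities for the contiguous index range
--     # instead of testing each i in a loop.
--     if head_pos is None:
--         return []
--     dr, dc = DELTA_DIRECTIONS.get(direction_str, (0, 0))
--     r0, c0 = head_pos[0], head_pos[1]
--     in_r = 0 <= r0 < maze_height
--     in_c = 0 <= c0 < maze_width
--     if dr == 0 and dc == 0:
--         return [(r0, c0)] * num_segments if in_r and in_c else []
--     if dr != 0:
--         if not in_c: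
--             return []
--         v0, size, d = r0, maze_height, dr
--     else:
--         if not in_r:
--             return []
--         v0, size, d = c0, maze_width, dc
--     if d == 1:
--         lo, hi = max(0, v0 - size + 1), min(num_segments - 1, v0)
--     else:
--         lo, hi = max(0, -v0), min(num_segments - 1, size - 1 - v0)
--     if dr != 0:
--         return [(v0 - i * d, c0) for i in range(lo, hi + 1)]
--     else:
--         return [(r0, v0 - i * d) for i in range(lo, hi + 1)]
-- ===== Notes on version B (the rewrite author's own statement) =====
-- stated objective: faster
-- what changed: B replaces A's per-index bounds test inside the loop by solving the bound inequalities in closed form for the contiguous in-bounds index interval (per direction delta, plus special cases for no head and the zero/default delta) and emitting the positions arithmetically over that interval.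
import Mathlib
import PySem

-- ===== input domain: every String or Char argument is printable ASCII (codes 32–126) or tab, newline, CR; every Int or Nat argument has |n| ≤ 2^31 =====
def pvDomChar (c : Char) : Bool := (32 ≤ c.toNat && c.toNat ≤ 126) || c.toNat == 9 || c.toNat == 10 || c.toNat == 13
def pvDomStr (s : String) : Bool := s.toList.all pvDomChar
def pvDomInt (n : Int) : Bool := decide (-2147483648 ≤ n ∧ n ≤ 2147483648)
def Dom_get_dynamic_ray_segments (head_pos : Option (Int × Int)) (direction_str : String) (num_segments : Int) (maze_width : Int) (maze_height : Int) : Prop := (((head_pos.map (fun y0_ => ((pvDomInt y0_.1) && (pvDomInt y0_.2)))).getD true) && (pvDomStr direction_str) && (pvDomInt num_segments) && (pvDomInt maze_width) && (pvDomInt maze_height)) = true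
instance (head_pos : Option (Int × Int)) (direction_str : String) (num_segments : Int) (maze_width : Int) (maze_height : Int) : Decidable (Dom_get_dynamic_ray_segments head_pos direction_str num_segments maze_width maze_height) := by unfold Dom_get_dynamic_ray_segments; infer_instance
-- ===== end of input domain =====

-- B replaces A's per-index bounds test inside the loop by solving the bound inequalities in closed
-- form for the contiguous index interval and emitting the positions arithmetically (objective: alternative).

-- ===== PORT A =====
def pvDELTA_DIRECTIONS : PySem.Dict String (Int × Int) :=
  ((((PySem.Dict.empty).insert "down" (1,0)).insert "up" (-1,0)).insert "left" (0,-1)).insert "right" (0,1)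

def get_dynamic_ray_segments (head_pos : Option (Int × Int)) (direction_str : String) (num_segments : Int) (maze_width : Int) (maze_height : Int) : List (Int × Int) :=
  match head_pos with
  | none => []
  | some hp =>
    let md := pvDELTA_DIRECTIONS.getD direction_str (0, 0)
    (PySem.List.pyRange 0 num_segments 1).foldl
      (fun segments i =>
        let seg_r := hp.1 - i * md.1
        let seg_c := hp.2 - i * md.2
        if 0 ≤ seg_r ∧ seg_r < maze_height ∧ 0 ≤ seg_c ∧ seg_c < maze_width
        then segments ++ [(seg_r, seg_c)] else segments)
      []

-- ===== PORT B =====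
def get_dynamic_ray_segments_alt (head_pos : Option (Int × Int)) (direction_str : String) (num_segments : Int) (maze_width : Int) (maze_height : Int) : List (Int × Int) :=
  match head_pos with
  | none => []
  | some hp =>
    let d2 := pvDELTA_DIRECTIONS.getD direction_str (0, 0)
    let r0 := hp.1
    let c0 := hp.2
    let in_r := 0 ≤ r0 ∧ r0 < maze_height
    let in_c := 0 ≤ c0 ∧ c0 < maze_width
    if d2.1 = 0 ∧ d2.2 = 0 then
      if in_r ∧ in_c then List.replicate num_segments.toNat (r0, c0) else []
    else if d2.1 ≠ 0 then
      if in_c then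
        let lohi := if d2.1 = 1 then (max 0 (r0 - maze_height + 1), min (num_segments - 1) r0)
                    else (max 0 (-r0), min (num_segments - 1) (maze_height - 1 - r0))
        (PySem.List.pyRange lohi.1 (lohi.2 + 1) 1).map (fun i => (r0 - i * d2.1, c0))
      else []
    else
      if in_r then
        let lohi := if d2.2 = 1 then (max 0 (c0 - maze_width + 1), min (num_segments - 1) c0)
                    else (max 0 (-c0), min (num_segments - 1) (maze_width - 1 - c0))
        (PySem.List.pyRange lohi.1 (lohi.2 + 1) 1).map (fun i => (r0, c0 - i * d2.2))
      else []

-- ===== PRECONDITION & SPEC =====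
def Spec_get_dynamic_ray_segments (head_pos : Option (Int × Int)) (direction_str : String) (num_segments : Int) (maze_width : Int) (maze_height : Int) (out : List (Int × Int)) : Prop := out = get_dynamic_ray_segments_alt head_pos direction_str num_segments maze_width maze_height
instance (head_pos : Option (Int × Int)) (direction_str : String) (num_segments : Int) (maze_width : Int) (maze_height : Int) (out : List (Int × Int)) : Decidable (Spec_get_dynamic_ray_segments head_pos direction_str num_segments maze_width maze_height out) := by unfold Spec_get_dynamic_ray_segments; infer_instance

-- ===== CLAIM (what is proved, stated in full; the proofs are below) =====
def Claim_equal_get_dynamic_ray_segments : Prop := ∀ (head_pos : Option (Int × Int)) (direction_str : String) (num_segments : Int) (maze_width : Int) (maze_height : Int), Dom_get_dynamic_ray_segments head_pos direction_str num_segments maze_width maze_height → Spec_get_dynamic_ray_segments head_pos direction_str num_segments maze_width maze_height (get_dynamic_ray_segments head_pos direction_str num_segments maze_width maze_height)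

-- ===== LEMMAS AND PROOFS =====

-- A's loop is a filter-then-map of the index range.
theorem pvFoldA_eq (mdr mdc r0 c0 w h : Int) (l : List Int) :
  (l.foldl (fun segments i =>
      let seg_r := r0 - i * mdr
      let seg_c := c0 - i * mdc
      if 0 ≤ seg_r ∧ seg_r < h ∧ 0 ≤ seg_c ∧ seg_c < w then segments ++ [(seg_r, seg_c)] else segments) [])
  = (l.filter (fun i => decide (0 ≤ r0 - i*mdr ∧ r0 - i*mdr < h ∧ 0 ≤ c0 - i*mdc ∧ c0 - i*mdc < w))).map
      (fun i => (r0 - i*mdr, c0 - i*mdc)) := by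
  simpa using PySem.List.foldl_append_ite (l := l) (acc := ([] : List (Int × Int)))
    (p := fun i => 0 ≤ r0 - i*mdr ∧ r0 - i*mdr < h ∧ 0 ≤ c0 - i*mdc ∧ c0 - i*mdc < w)
    (f := fun i => (r0 - i*mdr, c0 - i*mdc))

-- Filtering a step-1 range by an interval membership test yields the intersected range.
theorem pvFilter_pyRange_interval (p : Int → Bool) (lo hi : Int)
    (hp : ∀ i, p i = decide (lo ≤ i ∧ i ≤ hi)) :
    ∀ (n : Nat) (a b : Int), b - a ≤ n →
      (PySem.List.pyRange a b 1).filter p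
        = PySem.List.pyRange (max a lo) (min b (hi+1)) 1 := by
  intro n
  induction n with
  | zero =>
    intro a b hb
    rw [PySem.List.pyRange_one_eq_nil (by omega), PySem.List.pyRange_one_eq_nil (by omega)]
    rfl
  | succ n ih =>
    intro a b hb
    by_cases hab : a < b
    · rw [PySem.List.pyRange_one_cons hab, List.filter_cons]
      by_cases hpa : lo ≤ a ∧ a ≤ hi
      · rw [hp a, decide_eq_true hpa, if_pos rfl, ih (a+1) b (by omega),
            PySem.List.pyRange_one_cons (a := max a lo) (b := min b (hi+1)) (by omega)]
        rw [show max a lo + 1 = max (a+1) lo from by omega, show max a lo = a from by omega]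
      · rw [hp a, decide_eq_false hpa, ih (a+1) b (by omega)]
        simp only [Bool.false_eq_true, if_false]
        by_cases ha : a < lo
        · rw [show max a lo = lo from by omega, show max (a+1) lo = lo from by omega]
        · rw [PySem.List.pyRange_one_eq_nil (by omega), PySem.List.pyRange_one_eq_nil (by omega)]
    · rw [PySem.List.pyRange_one_eq_nil (by omega), PySem.List.pyRange_one_eq_nil (by omega)]
      rfl

-- The solved interval for a varying coordinate moving with delta +1 (head coord v0, axis size `size`).
theorem pvPos_case (v0 n size : Int) :
  (PySem.List.pyRange 0 n 1).filter (fun i => decide (0 ≤ v0 - i ∧ v0 - i < size))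
  = PySem.List.pyRange (max 0 (v0 - size + 1)) (min (n-1) v0 + 1) 1 := by
  rw [pvFilter_pyRange_interval _ (v0 - size + 1) v0
      (fun i => by simp only [decide_eq_decide]; omega) (n.toNat + 1) 0 n (by omega)]
  congr 1
  omega

-- The solved interval for a varying coordinate moving with delta -1.
theorem pvNeg_case (v0 n size : Int) :
  (PySem.List.pyRange 0 n 1).filter (fun i => decide (0 ≤ v0 + i ∧ v0 + i < size))
  = PySem.List.pyRange (max 0 (-v0)) (min (n-1) (size-1-v0) + 1) 1 := by
  rw [pvFilter_pyRange_interval _ (-v0) (size - 1 - v0)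
      (fun i => by simp only [decide_eq_decide]; omega) (n.toNat + 1) 0 n (by omega)]
  congr 1
  omega

-- An unknown direction falls back to the (0, 0) delta.
theorem pvGetD_default (s : String) (h1 : s ≠ "down") (h2 : s ≠ "up") (h3 : s ≠ "left") (h4 : s ≠ "right") :
    pvDELTA_DIRECTIONS.getD s (0,0) = (0,0) := by
  unfold pvDELTA_DIRECTIONS
  rw [PySem.Dict.getD_insert_of_ne _ _ _ h4, PySem.Dict.getD_insert_of_ne _ _ _ h3,
      PySem.Dict.getD_insert_of_ne _ _ _ h2, PySem.Dict.getD_insert_of_ne _ _ _ h1]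
  rfl

-- ===== VERDICT (by name: the statement is the Claim_ definition above) =====
theorem get_dynamic_ray_segments_spec : Claim_equal_get_dynamic_ray_segments := by
  intro head_pos direction_str num_segments maze_width maze_height _
  unfold Spec_get_dynamic_ray_segments
  cases head_pos with
  | none => rfl
  | some hp =>
    obtain ⟨r0, c0⟩ := hp
    by_cases hdn : direction_str = "down"
    · subst hdn
      simp only [get_dynamic_ray_segments, get_dynamic_ray_segments_alt,
        show pvDELTA_DIRECTIONS.getD "down" (0, 0) = (1, 0) from rfl]
      rw [pvFoldA_eq]
      by_cases hc : 0 ≤ c0 ∧ c0 < maze_width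
      · rw [if_neg (by simp), if_pos (by decide), if_pos hc, if_pos trivial]
        rw [List.filter_congr (fun i _ => show _ = decide (0 ≤ r0 - i ∧ r0 - i < maze_height) from
              by simp only [decide_eq_decide]; omega)]
        rw [pvPos_case]
        exact List.map_congr_left (fun i _ => by simp)
      · rw [if_neg (by simp), if_pos (by decide), if_neg hc]
        rw [List.filter_eq_nil_iff.mpr (fun i _ => by simp only [decide_eq_true_eq]; omega)]
        rfl
    · by_cases hup : direction_str = "up"
      · subst hup
        simp only [get_dynamic_ray_segments, get_dynamic_ray_segments_alt,
          show pvDELTA_DIRECTIONS.getD "up" (0, 0) = (-1, 0) from rfl]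
        rw [pvFoldA_eq]
        by_cases hc : 0 ≤ c0 ∧ c0 < maze_width
        · rw [if_neg (by simp), if_pos (by decide), if_pos hc, if_neg (by decide)]
          rw [List.filter_congr (fun i _ => show _ = decide (0 ≤ r0 + i ∧ r0 + i < maze_height) from
                by simp only [decide_eq_decide]; omega)]
          rw [pvNeg_case]
          exact List.map_congr_left (fun i _ => by simp)
        · rw [if_neg (by simp), if_pos (by decide), if_neg hc]
          rw [List.filter_eq_nil_iff.mpr (fun i _ => by simp only [decide_eq_true_eq]; omega)]
          rfl
      · by_cases hlt : direction_str = "left"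
        · subst hlt
          simp only [get_dynamic_ray_segments, get_dynamic_ray_segments_alt,
            show pvDELTA_DIRECTIONS.getD "left" (0, 0) = (0, -1) from rfl]
          rw [pvFoldA_eq]
          by_cases hr : 0 ≤ r0 ∧ r0 < maze_height
          · rw [if_neg (by simp), if_neg (by decide), if_pos hr, if_neg (by decide)]
            rw [List.filter_congr (fun i _ => show _ = decide (0 ≤ c0 + i ∧ c0 + i < maze_width) from
                  by simp only [decide_eq_decide]; omega)]
            rw [pvNeg_case]
            exact List.map_congr_left (fun i _ => by simp)
          · rw [if_neg (by simp), if_neg (by decide), if_neg hr]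
            rw [List.filter_eq_nil_iff.mpr (fun i _ => by simp only [decide_eq_true_eq]; omega)]
            rfl
        · by_cases hrt : direction_str = "right"
          · subst hrt
            simp only [get_dynamic_ray_segments, get_dynamic_ray_segments_alt,
              show pvDELTA_DIRECTIONS.getD "right" (0, 0) = (0, 1) from rfl]
            rw [pvFoldA_eq]
            by_cases hr : 0 ≤ r0 ∧ r0 < maze_height
            · rw [if_neg (by simp), if_neg (by decide), if_pos hr, if_pos trivial]
              rw [List.filter_congr (fun i _ => show _ = decide (0 ≤ c0 - i ∧ c0 - i < maze_width) from
                    by simp only [decide_eq_decide]; omega)]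
              rw [pvPos_case]
              exact List.map_congr_left (fun i _ => by simp)
            · rw [if_neg (by simp), if_neg (by decide), if_neg hr]
              rw [List.filter_eq_nil_iff.mpr (fun i _ => by simp only [decide_eq_true_eq]; omega)]
              rfl
          · simp only [get_dynamic_ray_segments, get_dynamic_ray_segments_alt,
              pvGetD_default direction_str hdn hup hlt hrt]
            rw [pvFoldA_eq]
            by_cases hin : (0 ≤ r0 ∧ r0 < maze_height) ∧ (0 ≤ c0 ∧ c0 < maze_width)
            · rw [if_pos (by decide), if_pos hin]
              rw [List.filter_eq_self.mpr (fun i _ => by simp only [decide_eq_true_eq]; omega)]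
              rw [show (fun i : Int => (r0 - i*0, c0 - i*0)) = (fun _ : Int => (r0, c0)) from
                    funext fun i => by simp]
              simp [List.map_const', PySem.List.length_pyRange_one]
            · rw [if_pos (by decide), if_neg hin]
              rw [List.filter_eq_nil_iff.mpr (fun i _ => by simp only [decide_eq_true_eq]; omega)]
              rfl
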